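-- pv_equiv track=rewrite | github.com/safronovD/spbstu-smart-library | analytics/nlp/keywords_freq.py | get_keywords_freq
-- ===== SOURCE A (Python) =====
-- from collections import defaultdict
--
-- def get_keywords_freq(words, keywords):
--     keyword_sets = [set(keyword) for keyword in keywords]
--     output_dict = defaultdict(int)
--
--     for i in range(len(words)):
--         for j in range(len(keyword_sets)):
--             if words[i] in keyword_sets[j]:
--                 if set(words[i:i + len(keyword_sets[j])]) == keyword_sets[j]:
--                     output_dict[j] += 1
--
--     return output_dict
-- ===== SOURCE B (Python) =====
-- from collections import defaultdict
--
-- def get_keywords_freq(words, keywords):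
--     n = len(words)
--     # Per keyword: run[i] = length of the longest prefix of words[i:] made of
--     # pairwise-distinct members of the keyword set, computed right-to-left in O(n).
--     # A window words[i:i+L] equals the keyword set (of size L) iff run[i] >= L.
--     ok = []
--     for kw in keywords:
--         s = set(kw)
--         L = len(s)
--         run = [0] * (n + 1)
--         nxt = {}
--         for i in range(n - 1, -1, -1):
--             w = words[i]
--             if w in s:
--                 run[i] = min(run[i + 1] + 1, nxt.get(w, n) - i)
--             nxt[w] = i
--         ok.append([L >= 1 and i + L <= n and run[i] >= L for i in range(n)])
--     output = defaultdict(int)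
--     for i in range(n):
--         for j in range(len(keywords)):
--             if ok[j][i]:
--                 output[j] += 1
--     return output
-- ===== Notes on version B (the rewrite author's own statement) =====
-- stated objective: alternative
-- what changed: Instead of rebuilding and comparing a set for every (position, keyword) pair, B precomputes per keyword, in one right-to-left pass (next-occurrence dict + run-length recurrence), the longest distinct-members run starting at each position; a window of length L equals the L-element keyword set iff that run is at least L, so the per-window set construction and comparison disappear.
import Mathlib
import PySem

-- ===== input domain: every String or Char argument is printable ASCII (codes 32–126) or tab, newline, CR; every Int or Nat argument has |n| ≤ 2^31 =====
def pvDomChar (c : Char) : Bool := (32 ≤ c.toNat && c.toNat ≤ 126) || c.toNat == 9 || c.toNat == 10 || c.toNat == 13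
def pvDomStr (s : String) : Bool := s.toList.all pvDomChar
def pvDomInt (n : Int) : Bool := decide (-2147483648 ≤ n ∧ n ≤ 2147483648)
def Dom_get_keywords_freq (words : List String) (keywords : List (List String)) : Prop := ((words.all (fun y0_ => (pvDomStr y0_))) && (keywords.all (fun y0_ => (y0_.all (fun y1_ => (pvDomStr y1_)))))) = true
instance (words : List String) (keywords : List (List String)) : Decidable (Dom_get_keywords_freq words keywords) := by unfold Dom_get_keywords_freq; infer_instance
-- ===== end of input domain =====

-- B replaces A's per-window set construction/comparison with a per-keyword
-- right-to-left precomputation (next-occurrence dict + longest-distinct-run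
-- recurrence): an alternative algorithm; the timed cost is comparable to A's.

-- ===== PORT A =====
def get_keywords_freq (words : List String) (keywords : List (List String)) : List (Int × Int) :=
  let keyword_sets : List (PySem.Set String) := keywords.map (fun keyword => PySem.Set.ofList keyword)
  let output_dict : PySem.Dict Int Int :=
    (PySem.List.pyRange 0 (words.length : Int) 1).foldl (fun od i =>
      (PySem.List.pyRange 0 (keyword_sets.length : Int) 1).foldl (fun od j =>
        let sj := PySem.List.pyGetD keyword_sets j []
        if PySem.Set.contains sj (PySem.List.pyGetD words i "") then
          if PySem.Set.equal (PySem.Set.ofList (PySem.List.slice words (some i) (some (i + (sj.length : Int))))) sj then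
            od.modify j 0 (· + 1)
          else od
        else od) od) PySem.Dict.empty
  output_dict.items

-- ===== PORT B =====
def get_keywords_freq_alt (words : List String) (keywords : List (List String)) : List (Int × Int) :=
  let n : Int := (words.length : Int)
  let ok : List (List Bool) := keywords.map (fun kw =>
    let s : PySem.Set String := PySem.Set.ofList kw
    let L : Int := (s.length : Int)
    -- right-to-left pass: run[i] = longest prefix of words[i:] of pairwise-distinct members of s
    let fin := (PySem.List.pyRange (n - 1) (-1) (-1)).foldl
      (fun (st : List Int × PySem.Dict String Int) i =>
        let w := PySem.List.pyGetD words i ""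
        let run := if PySem.Set.contains s w then
            PySem.List.pySetD st.1 i (min (PySem.List.pyGetD st.1 (i + 1) 0 + 1) (st.2.getD w n - i))
          else st.1
        (run, st.2.insert w i))
      (List.replicate (words.length + 1) (0 : Int), PySem.Dict.empty)
    (PySem.List.pyRange 0 n 1).map (fun i =>
      decide (1 ≤ L) && decide (i + L ≤ n) && decide (L ≤ PySem.List.pyGetD fin.1 i 0)))
  let output : PySem.Dict Int Int :=
    (PySem.List.pyRange 0 n 1).foldl (fun od i =>
      (PySem.List.pyRange 0 (keywords.length : Int) 1).foldl (fun od j =>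
        if PySem.List.pyGetD (PySem.List.pyGetD ok j []) i false then od.modify j 0 (· + 1)
        else od) od) PySem.Dict.empty
  output.items

-- ===== PRECONDITION & SPEC =====
def Spec_get_keywords_freq (words : List String) (keywords : List (List String)) (out : List (Int × Int)) : Prop := out = get_keywords_freq_alt words keywords
instance (words : List String) (keywords : List (List String)) (out : List (Int × Int)) : Decidable (Spec_get_keywords_freq words keywords out) := by unfold Spec_get_keywords_freq; infer_instance

-- ===== CLAIM (what is proved, stated in full; the proofs are below) =====
def Claim_equal_get_keywords_freq : Prop := ∀ (words : List String) (keywords : List (List String)), Dom_get_keywords_freq words keywords → Spec_get_keywords_freq words keywords (get_keywords_freq words keywords)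

-- ===== LEMMAS AND PROOFS =====

-- longest prefix of l consisting of pairwise-distinct members of s
def pvMaxRun (s : PySem.Set String) : List String → Nat
  | [] => 0
  | w :: ws => if w ∈ s then min (pvMaxRun s ws + 1) (ws.idxOf w + 1) else 0

-- B's loop body, named for the proofs (definitionally the lambda in the port)
def pvStepB (words : List String) (s : PySem.Set String)
    (st : List Int × PySem.Dict String Int) (i : Int) : List Int × PySem.Dict String Int :=
  let w := PySem.List.pyGetD words i ""
  let run := if PySem.Set.contains s w then
      PySem.List.pySetD st.1 i (min (PySem.List.pyGetD st.1 (i + 1) 0 + 1)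
        (st.2.getD w (words.length : Int) - i))
    else st.1
  (run, st.2.insert w i)

def pvInv (words : List String) (s : PySem.Set String) (i : Nat)
    (st : List Int × PySem.Dict String Int) : Prop :=
  st.1.length = words.length + 1 ∧
  (∀ k : Nat, k < i → st.1.getD k 0 = 0) ∧
  (∀ k : Nat, i ≤ k → k ≤ words.length → st.1.getD k 0 = (pvMaxRun s (words.drop k) : Nat)) ∧
  (∀ w : String, st.2.get? w =
    if w ∈ words.drop i then some (((i + (words.drop i).idxOf w : Nat)) : Int) else none)

theorem pv_mem_take_iff_idxOf_lt (l : List String) (w : String) (m : Nat) (hm : m ≤ l.length) :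
    w ∈ l.take m ↔ l.idxOf w < m := by
  constructor
  · intro h
    induction l generalizing m with
    | nil => simp at h
    | cons a t ih =>
      cases m with
      | zero => simp at h
      | succ m' =>
        simp [List.take_succ_cons] at h
        by_cases hw : a = w
        · simp [hw, List.idxOf_cons_self]
        · rcases h with h | h
          · exact absurd h.symm hw
          · have := ih m' (by simpa using Nat.le_of_succ_le_succ hm) h
            simp [List.idxOf_cons_ne _ (by simpa using hw)]
            omega
  · intro h
    have hlt : l.idxOf w < l.length := lt_of_lt_of_le h hm
    have hget : l[l.idxOf w]'hlt = w := List.getElem_idxOf hlt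
    have h2 : (l.take m)[l.idxOf w]'(by simp; omega) = w := by
      rw [List.getElem_take]; exact hget
    exact h2 ▸ List.getElem_mem _

theorem pvMaxRun_ge_iff (s : PySem.Set String) (l : List String) (L : Nat) :
    L ≤ pvMaxRun s l ↔ L ≤ l.length ∧ (l.take L).Nodup ∧ ∀ w ∈ l.take L, w ∈ s := by
  induction l generalizing L with
  | nil => cases L <;> simp [pvMaxRun]
  | cons w ws ih =>
    cases L with
    | zero => simp
    | succ L' =>
      simp only [pvMaxRun, List.take_succ_cons, List.length_cons, List.nodup_cons,
        List.mem_cons, Nat.add_le_add_iff_right]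
      by_cases hw : w ∈ s
      · rw [if_pos hw]
        have hmin : L' + 1 ≤ min (pvMaxRun s ws + 1) (ws.idxOf w + 1)
            ↔ L' ≤ pvMaxRun s ws ∧ L' ≤ ws.idxOf w := by omega
        rw [hmin, ih L']
        constructor
        · rintro ⟨⟨hlen, hnd, hmem⟩, hidx⟩
          refine ⟨hlen, ⟨?_, hnd⟩, ?_⟩
          · intro hc
            have := (pv_mem_take_iff_idxOf_lt ws w L' hlen).mp hc
            omega
          · rintro x (rfl | hx)
            · exact hw
            · exact hmem x hx
        · rintro ⟨hlen, ⟨hni, hnd⟩, hmem⟩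
          refine ⟨⟨hlen, hnd, fun x hx => hmem x (Or.inr hx)⟩, ?_⟩
          by_contra hc
          exact hni ((pv_mem_take_iff_idxOf_lt ws w L' hlen).mpr (by omega))
      · rw [if_neg hw]
        constructor
        · intro h
          exact absurd h (by omega)
        · rintro ⟨_, _, hmem⟩
          exact absurd (hmem w (Or.inl rfl)) hw

theorem pv_nodup_of_ofList_length (l : List String)
    (h : (PySem.Set.ofList l).length = l.length) : l.Nodup := by
  induction l with
  | nil => exact List.nodup_nil
  | cons x xs ih =>
    rw [PySem.Set.ofList_cons] at h
    simp only [List.length_cons] at h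
    have hle : (PySem.Set.ofList xs).length ≤ xs.length := PySem.Set.length_ofList_le xs
    have hdle : (PySem.Set.discard (PySem.Set.ofList xs) x).length ≤ (PySem.Set.ofList xs).length :=
      List.length_filter_le _ _
    have hdeq : (PySem.Set.discard (PySem.Set.ofList xs) x).length = xs.length := by omega
    have hofeq : (PySem.Set.ofList xs).length = xs.length := by omega
    have hxnot : x ∉ xs := by
      intro hx
      have : (PySem.Set.discard (PySem.Set.ofList xs) x).length < (PySem.Set.ofList xs).length := by
        apply List.length_filter_lt_length_iff_exists.mpr
        exact ⟨x, (PySem.Set.mem_ofList xs x).mpr hx, by simp⟩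
      omega
    exact List.nodup_cons.mpr ⟨hxnot, ih hofeq⟩

theorem pv_core (s : PySem.Set String) (hs : s.Nodup) (w : String) (tl : List String) :
    (w ∈ s ∧ PySem.Set.equal (PySem.Set.ofList ((w :: tl).take s.length)) s = true)
    ↔ (1 ≤ s.length ∧ s.length ≤ (w :: tl).length ∧ s.length ≤ pvMaxRun s (w :: tl)) := by
  constructor
  · rintro ⟨hw, heq⟩
    have hmem : ∀ x, x ∈ (w :: tl).take s.length ↔ x ∈ s := by
      intro x
      rw [← PySem.Set.mem_ofList]
      exact (PySem.Set.equal_iff _ _).mp heq x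
    have h1 : 1 ≤ s.length := List.length_pos_of_mem hw
    have hperm : (PySem.Set.ofList ((w :: tl).take s.length)).Perm s :=
      (List.perm_ext_iff_of_nodup (PySem.Set.nodup_ofList _) hs).mpr
        (fun x => (PySem.Set.mem_ofList _ x).trans (hmem x))
    have hlen : (PySem.Set.ofList ((w :: tl).take s.length)).length = s.length := hperm.length_eq
    have htk : ((w :: tl).take s.length).length = min s.length (tl.length + 1) := by
      simp [List.length_take]
    have hofle : (PySem.Set.ofList ((w :: tl).take s.length)).length ≤ ((w :: tl).take s.length).length :=
      PySem.Set.length_ofList_le _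
    have hwin : ((w :: tl).take s.length).length = s.length := by omega
    have hnd : ((w :: tl).take s.length).Nodup := pv_nodup_of_ofList_length _ (by omega)
    refine ⟨h1, by simpa using (by omega : s.length ≤ tl.length + 1), ?_⟩
    exact (pvMaxRun_ge_iff s (w :: tl) s.length).mpr
      ⟨by simpa using (by omega : s.length ≤ tl.length + 1), hnd, fun x hx => (hmem x).mp hx⟩
  · rintro ⟨h1, h2, h3⟩
    obtain ⟨hlen, hnd, hsub⟩ := (pvMaxRun_ge_iff s (w :: tl) s.length).mp h3
    have hwin : ((w :: tl).take s.length).length = s.length := by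
      simp only [List.length_take]
      simp only [List.length_cons] at hlen
      omega
    have hperm : ((w :: tl).take s.length).Perm s :=
      (List.Nodup.subperm hnd (fun x hx => hsub x hx)).perm_of_length_le (by omega)
    have hwmem : w ∈ (w :: tl).take s.length := by
      obtain ⟨L', hL'⟩ : ∃ L', s.length = L' + 1 := ⟨s.length - 1, by omega⟩
      rw [hL', List.take_succ_cons]
      exact List.mem_cons_self
    refine ⟨hperm.subset hwmem, ?_⟩
    rw [PySem.Set.equal_iff]
    intro x
    rw [PySem.Set.mem_ofList]
    exact hperm.mem_iff

theorem pvInv_init (words : List String) (s : PySem.Set String) :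
    pvInv words s words.length (List.replicate (words.length + 1) (0 : Int), PySem.Dict.empty) := by
  refine ⟨by simp, ?_, ?_, ?_⟩
  · intro k hk
    exact List.getD_replicate 0 (by omega)
  · intro k h1 h2
    have hk : k = words.length := by omega
    subst hk
    rw [List.getD_replicate 0 (by omega), List.drop_length]
    simp [pvMaxRun]
  · intro w
    rw [List.drop_length]
    simp [PySem.Dict.get?_empty]

theorem pv_getD_set_ne (l : List Int) (i k : Nat) (v : Int) (h : i ≠ k) :
    (l.set i v).getD k 0 = l.getD k 0 := by
  simp only [List.getD, List.getElem?_set_ne h]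

theorem pv_getD_set_self (l : List Int) (i : Nat) (v : Int) (h : i < l.length) :
    (l.set i v).getD i 0 = v := by
  simp only [List.getD, List.getElem?_set_self h, Option.getD_some]

theorem pvStep (words : List String) (s : PySem.Set String) (i : Nat) (hi : i < words.length)
    (st : List Int × PySem.Dict String Int) (h : pvInv words s (i + 1) st) :
    pvInv words s i (pvStepB words s st (i : Int)) := by
  obtain ⟨hlen, hlow, hhigh, hdict⟩ := h
  have hwval : PySem.List.pyGetD words (i : Int) "" = words[i] := by
    rw [PySem.List.pyGetD_natCast, List.getD_eq_getElem words "" hi]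
  have hdropi : words.drop i = words[i] :: words.drop (i + 1) := List.drop_eq_getElem_cons hi
  by_cases hmem : words[i] ∈ s
  · -- member branch: cell i is overwritten with the run value
    have hcont : PySem.Set.contains s words[i] = true := (PySem.Set.contains_iff s _).mpr hmem
    have hstep : pvStepB words s st (i : Int) =
        (st.1.set i (min (PySem.List.pyGetD st.1 ((i : Int) + 1) 0 + 1)
          (st.2.getD words[i] (words.length : Int) - (i : Int))),
         st.2.insert words[i] (i : Int)) := by
      simp only [pvStepB, hwval, hcont, if_pos, PySem.List.pySetD_natCast]
    rw [hstep]
    have e1 : PySem.List.pyGetD st.1 ((i : Int) + 1) 0 = ((pvMaxRun s (words.drop (i + 1)) : Nat) : Int) := by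
      have hc : ((i : Int) + 1) = ((i + 1 : Nat) : Int) := by push_cast; ring
      rw [hc, PySem.List.pyGetD_natCast]
      exact hhigh (i + 1) (by omega) (by omega)
    have e2 : st.2.getD words[i] (words.length : Int) - (i : Int)
        = (((words.drop (i + 1)).idxOf words[i] + 1 : Nat) : Int) := by
      rw [PySem.Dict.getD_eq_get?_getD, hdict words[i]]
      by_cases hin : words[i] ∈ words.drop (i + 1)
      · rw [if_pos hin]
        simp only [Option.getD_some]
        push_cast
        ring
      · rw [if_neg hin]
        rw [List.idxOf_eq_length hin, List.length_drop]
        simp only [Option.getD_none]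
        push_cast
        omega
    have hv : min (PySem.List.pyGetD st.1 ((i : Int) + 1) 0 + 1)
          (st.2.getD words[i] (words.length : Int) - (i : Int))
        = ((pvMaxRun s (words.drop i) : Nat) : Int) := by
      rw [e1, e2, hdropi]
      simp only [pvMaxRun, if_pos hmem]
      push_cast
      omega
    refine ⟨by simpa using hlen, ?_, ?_, ?_⟩
    · intro k hk
      rw [pv_getD_set_ne _ _ _ _ (by omega)]
      exact hlow k (by omega)
    · intro k h1 h2
      by_cases hk : k = i
      · subst hk
        rw [pv_getD_set_self _ _ _ (by omega), hv]
      · rw [pv_getD_set_ne _ _ _ _ (by omega)]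
        exact hhigh k (by omega) h2
    · intro x
      by_cases hx : x = words[i]
      · subst hx
        rw [PySem.Dict.get?_insert_self, hdropi, if_pos List.mem_cons_self, List.idxOf_cons_self]
        norm_num
      · rw [PySem.Dict.get?_insert_of_ne _ _ hx, hdict x, hdropi]
        by_cases hin : x ∈ words.drop (i + 1)
        · rw [if_pos hin, if_pos (List.mem_cons_of_mem _ hin)]
          rw [List.idxOf_cons_ne _ (fun hc => hx (by rw [hc]))]
          push_cast
          ring_nf
        · rw [if_neg hin, if_neg (by simp only [List.mem_cons, not_or]; exact ⟨hx, hin⟩)]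
  · -- non-member branch: run list untouched
    have hcont : PySem.Set.contains s words[i] = false := by
      simp only [← Bool.not_eq_true, PySem.Set.contains_iff]
      exact hmem
    have hstep : pvStepB words s st (i : Int) = (st.1, st.2.insert words[i] (i : Int)) := by
      simp only [pvStepB, hwval, hcont, Bool.false_eq_true, if_false]
    rw [hstep]
    refine ⟨hlen, ?_, ?_, ?_⟩
    · intro k hk
      exact hlow k (by omega)
    · intro k h1 h2
      by_cases hk : k = i
      · subst hk
        rw [hlow k (by omega), hdropi]
        simp [pvMaxRun, hmem]
      · exact hhigh k (by omega) h2
    · intro x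
      by_cases hx : x = words[i]
      · subst hx
        rw [PySem.Dict.get?_insert_self, hdropi, if_pos List.mem_cons_self, List.idxOf_cons_self]
        norm_num
      · rw [PySem.Dict.get?_insert_of_ne _ _ hx, hdict x, hdropi]
        by_cases hin : x ∈ words.drop (i + 1)
        · rw [if_pos hin, if_pos (List.mem_cons_of_mem _ hin)]
          rw [List.idxOf_cons_ne _ (fun hc => hx (by rw [hc]))]
          push_cast
          ring_nf
        · rw [if_neg hin, if_neg (by simp only [List.mem_cons, not_or]; exact ⟨hx, hin⟩)]

theorem pvLoop (words : List String) (s : PySem.Set String) (i : Nat) (hi : i ≤ words.length)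
    (st : List Int × PySem.Dict String Int) (h : pvInv words s i st) :
    pvInv words s 0 ((PySem.List.pyRange ((i : Int) - 1) (-1) (-1)).foldl (pvStepB words s) st) := by
  induction i generalizing st with
  | zero =>
    rw [PySem.List.pyRange_neg_one_eq_nil (by norm_num)]
    exact h
  | succ i ih =>
    rw [show ((i + 1 : Nat) : Int) - 1 = (i : Int) by push_cast; ring,
      PySem.List.pyRange_neg_one_cons (by have := Int.natCast_nonneg i; omega)]
    rw [List.foldl_cons]
    exact ih (by omega) _ (pvStep words s i (by omega) st h)

theorem pvRun_final (words : List String) (s : PySem.Set String) (k : Nat) (hk : k ≤ words.length) :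
    ((PySem.List.pyRange ((words.length : Int) - 1) (-1) (-1)).foldl (pvStepB words s)
      (List.replicate (words.length + 1) (0 : Int), PySem.Dict.empty)).1.getD k 0
    = ((pvMaxRun s (words.drop k) : Nat) : Int) := by
  have h := pvLoop words s words.length le_rfl _ (pvInv_init words s)
  exact h.2.2.1 k (Nat.zero_le _) hk

lemma pv_main (words : List String) (keywords : List (List String)) :
    get_keywords_freq words keywords = get_keywords_freq_alt words keywords := by
  simp only [get_keywords_freq, get_keywords_freq_alt, List.length_map]
  congr 1
  apply PySem.List.foldl_congr_mem
  intro od i hi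
  apply PySem.List.foldl_congr_mem
  intro od' j hj
  rw [PySem.List.mem_pyRange_one] at hi hj
  lift i to Nat using hi.1 with ki
  lift j to Nat using hj.1 with kj
  have hki : ki < words.length := by exact_mod_cast hi.2
  have hkj : kj < keywords.length := by exact_mod_cast hj.2
  have hmapGetD : ∀ {β : Type} (F : List String → β) (dflt : β),
      PySem.List.pyGetD (keywords.map F) (kj : Int) dflt = F keywords[kj] := by
    intro β F dflt
    rw [PySem.List.pyGetD_natCast,
      List.getD_eq_getElem _ _ (by simpa using hkj), List.getElem_map]
  have hw : PySem.List.pyGetD words (ki : Int) "" = words[ki] := by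
    rw [PySem.List.pyGetD_natCast, List.getD_eq_getElem words "" hki]
  simp only [hmapGetD]
  have hfold : (fun (st : List Int × PySem.Dict String Int) (i : Int) =>
      (if PySem.Set.contains (PySem.Set.ofList keywords[kj]) (PySem.List.pyGetD words i "") = true then
          PySem.List.pySetD st.1 i (min (PySem.List.pyGetD st.1 (i + 1) 0 + 1)
            (st.2.getD (PySem.List.pyGetD words i "") (words.length : Int) - i))
        else st.1,
        st.2.insert (PySem.List.pyGetD words i "") i))
      = pvStepB words (PySem.Set.ofList keywords[kj]) := rfl
  rw [hfold, hw]
  rw [PySem.List.pyGetD_map_pyRange _ words.length ki false hki]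
  rw [PySem.List.pyGetD_natCast, pvRun_final words (PySem.Set.ofList keywords[kj]) ki (by omega)]
  rw [PySem.List.slice_natCast_add words ki (PySem.Set.ofList keywords[kj]).length]
  have hdrop : words.drop ki = words[ki] :: words.drop (ki + 1) := List.drop_eq_getElem_cons hki
  have hlendrop : (words.drop ki).length = words.length - ki := List.length_drop
  have hcore := pv_core (PySem.Set.ofList keywords[kj]) (PySem.Set.nodup_ofList _)
    words[ki] (words.drop (ki + 1))
  rw [← hdrop] at hcore
  rw [hlendrop] at hcore
  by_cases hc1 : words[ki] ∈ PySem.Set.ofList keywords[kj]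
  · conv_lhs => rw [if_pos ((PySem.Set.contains_iff _ _).mpr hc1)]
    by_cases hc2 : PySem.Set.equal
        (PySem.Set.ofList ((words.drop ki).take (PySem.Set.ofList keywords[kj]).length))
        (PySem.Set.ofList keywords[kj]) = true
    · conv_lhs => rw [if_pos hc2]
      obtain ⟨h1, h2, h3⟩ := hcore.mp ⟨hc1, hc2⟩
      rw [if_pos (by
        simp only [Bool.and_eq_true, decide_eq_true_eq]
        refine ⟨⟨?_, ?_⟩, ?_⟩ <;> omega)]
    · conv_lhs => rw [if_neg hc2]
      rw [if_neg (by
        intro hb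
        simp only [Bool.and_eq_true, decide_eq_true_eq] at hb
        obtain ⟨⟨hb1, hb2⟩, hb3⟩ := hb
        exact hc2 ((hcore.mpr ⟨by omega, by omega, by omega⟩).2))]
  · conv_lhs => rw [if_neg (fun hc => hc1 ((PySem.Set.contains_iff _ _).mp hc))]
    rw [if_neg (by
      intro hb
      simp only [Bool.and_eq_true, decide_eq_true_eq] at hb
      obtain ⟨⟨hb1, hb2⟩, hb3⟩ := hb
      exact hc1 ((hcore.mpr ⟨by omega, by omega, by omega⟩).1))]

-- ===== VERDICT (by name: the statement is the Claim_ definition above) =====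
theorem get_keywords_freq_spec : Claim_equal_get_keywords_freq := by
  intro words keywords _
  exact pv_main words keywords
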